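-- pv_equiv track=rewrite | github.com/erichstrange/regex_scrape | post_process.py | find_keywords_in_patterns
-- ===== SOURCE A (Python) =====
-- KEYWORDS = {
--     "billing", "paypal", "account", "checkout", "login", "shipping", "confirmation",
--     "subscribe", "purchase", "payment", "blocked", "order", "thank-you",
--     "thanks", "cart", "subscription", "success", "check-out"
-- }
--
-- def find_keywords_in_patterns(patterns_list):
--     """
--     patterns_list is e.g. ["/billing/(?:/.*)?", "..."]
--     We'll check partial substring ignoring case for each known KEYWORD.
--     We unify all that appear.
--     """
--     found = set()
--     # join patterns into one big text or check individually
--     for pat in patterns_list: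
--         pat_lower = pat.lower()
--         for kw in KEYWORDS:
--             if kw.lower() in pat_lower:  # partial substring
--                 found.add(kw)
--     return sorted(found)
-- ===== SOURCE B (Python) =====
-- KEYWORDS = {
--     "billing", "paypal", "account", "checkout", "login", "shipping", "confirmation",
--     "subscribe", "purchase", "payment", "blocked", "order", "thank-you",
--     "thanks", "cart", "subscription", "success", "check-out"
-- }
--
-- def find_keywords_in_patterns(patterns_list):
--     # One pass: build a single lowercased haystack (space-joined so no keyword
--     # can match across pattern boundaries), then test each keyword once.
--     blob = " ".join(p.lower() for p in patterns_list)
--     return [kw for kw in sorted(KEYWORDS) if kw in blob]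
-- ===== Notes on version B (the rewrite author's own statement) =====
-- stated objective: simpler
-- what changed: Replaces the per-pattern nested keyword scan plus set accumulation and final sort by building one space-joined lowercased haystack and filtering the sorted keyword list with a single substring test per keyword.
import Mathlib
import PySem

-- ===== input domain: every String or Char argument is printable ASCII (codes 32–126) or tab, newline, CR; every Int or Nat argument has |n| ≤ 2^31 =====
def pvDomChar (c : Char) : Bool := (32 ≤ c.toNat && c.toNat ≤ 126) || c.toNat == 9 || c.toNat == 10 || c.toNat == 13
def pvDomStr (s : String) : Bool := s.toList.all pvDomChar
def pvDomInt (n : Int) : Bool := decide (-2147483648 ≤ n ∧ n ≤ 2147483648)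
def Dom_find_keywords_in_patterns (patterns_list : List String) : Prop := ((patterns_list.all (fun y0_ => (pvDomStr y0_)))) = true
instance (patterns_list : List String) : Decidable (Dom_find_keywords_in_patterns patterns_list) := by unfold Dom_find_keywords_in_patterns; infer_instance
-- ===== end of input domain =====

-- B replaces the nested per-pattern keyword scan, set accumulation and final sort by one
-- space-joined lowercased haystack filtered over the sorted keyword list (objective: simpler).

-- ===== PORT A =====
def KEYWORDS : PySem.Set String := PySem.Set.ofList
  ["billing", "paypal", "account", "checkout", "login", "shipping", "confirmation",
   "subscribe", "purchase", "payment", "blocked", "order", "thank-you",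
   "thanks", "cart", "subscription", "success", "check-out"]

def find_keywords_in_patterns (patterns_list : List String) : List String :=
  let found : PySem.Set String :=
    patterns_list.foldl
      (fun found pat =>
        let pat_lower := PySem.Str.lower pat
        KEYWORDS.foldl
          (fun found kw =>
            if PySem.Str.isIn (PySem.Str.lower kw) pat_lower then PySem.Set.add found kw
            else found)
          found)
      PySem.Set.empty
  PySem.List.sorted found (fun x => x) false

-- ===== PORT B =====
def find_keywords_in_patterns_alt (patterns_list : List String) : List String :=
  let blob := PySem.Str.join " " (patterns_list.map PySem.Str.lower)
  (PySem.List.sorted KEYWORDS (fun x => x) false).filter (fun kw => PySem.Str.isIn kw blob)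

-- ===== PRECONDITION & SPEC =====
def Spec_find_keywords_in_patterns (patterns_list : List String) (out : List String) : Prop := out = find_keywords_in_patterns_alt patterns_list
instance (patterns_list : List String) (out : List String) : Decidable (Spec_find_keywords_in_patterns patterns_list out) := by unfold Spec_find_keywords_in_patterns; infer_instance

-- ===== CLAIM (what is proved, stated in full; the proofs are below) =====
def Claim_equal_find_keywords_in_patterns : Prop := ∀ (patterns_list : List String), Dom_find_keywords_in_patterns patterns_list → Spec_find_keywords_in_patterns patterns_list (find_keywords_in_patterns patterns_list)

-- ===== LEMMAS AND PROOFS =====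

-- Each keyword is nonempty, contains no space, and is already lowercase.
theorem kw_facts : ∀ kw ∈ (KEYWORDS : List String),
    kw.toList ≠ [] ∧ ' ' ∉ kw.toList ∧ PySem.Chars.lower kw.toList = kw.toList := by decide

-- A prefix of a ++ c :: b not containing c is a prefix of a.
theorem prefix_split {l a b : List Char} {c : Char} (hc : c ∉ l)
    (h : l <+: a ++ c :: b) : l <+: a := by
  obtain ⟨t, ht⟩ := h
  by_cases hl : l.length ≤ a.length
  · have h1 : l = (a ++ c :: b).take l.length := by rw [← ht]; simp
    rw [List.take_append_of_le_length hl] at h1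
    exact h1 ▸ List.take_prefix _ _
  · exfalso
    apply hc
    have h1 : (l ++ t)[a.length]? = some c := by
      rw [ht]
      simp
    rw [List.getElem?_append_left (by omega)] at h1
    exact List.mem_of_getElem? h1
-- An infix of a ++ c :: b not containing c is an infix of a or of b.
theorem infix_split {l a b : List Char} {c : Char} (hc : c ∉ l)
    (h : l <:+: a ++ c :: b) : l <:+: a ∨ l <:+: b := by
  obtain ⟨s, t, hst⟩ := h
  by_cases hs : s.length ≤ a.length
  · left
    have hd : l ++ t = a.drop s.length ++ c :: b := by
      have := congrArg (List.drop s.length) hst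
      rwa [List.append_assoc, List.drop_left, List.drop_append_of_le_length hs] at this
    have hp : l <+: a.drop s.length ++ c :: b := ⟨t, hd⟩
    exact ((prefix_split hc hp).isInfix).trans (List.drop_suffix _ _).isInfix
  · right
    have hd : s.drop (a.length + 1) ++ (l ++ t) = b := by
      have := congrArg (List.drop (a.length + 1)) hst
      rwa [List.append_assoc, List.drop_append_of_le_length (by omega),
        show (a ++ c :: b).drop (a.length + 1) = b by simp [List.drop_append]] at this
    exact ⟨s.drop (a.length + 1), t, by rw [← hd]; simp⟩

-- A nonempty, space-free word is a substring of the space-joined text iff of some part.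
theorem join_infix (l : List Char) (hne : l ≠ []) (hsp : ' ' ∉ l) :
    ∀ parts : List (List Char),
      (l <:+: PySem.Chars.join [' '] parts ↔ ∃ p ∈ parts, l <:+: p) := by
  intro parts
  induction parts with
  | nil => simp [PySem.Chars.join_nil, List.infix_nil, hne]
  | cons p rest ih =>
    cases rest with
    | nil => simp [PySem.Chars.join_singleton]
    | cons q rest' =>
      rw [PySem.Chars.join_cons_cons]
      have hform : p ++ [' '] ++ PySem.Chars.join [' '] (q :: rest')
          = p ++ ' ' :: PySem.Chars.join [' '] (q :: rest') := by simp
      rw [hform]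
      constructor
      · intro h
        rcases infix_split hsp h with h1 | h2
        · exact ⟨p, by simp, h1⟩
        · obtain ⟨r, hr, hlr⟩ := (ih).mp h2
          exact ⟨r, by simp [hr], hlr⟩
      · rintro ⟨r, hr, hlr⟩
        rcases List.mem_cons.mp hr with rfl | hr'
        · exact hlr.trans ⟨[], ' ' :: PySem.Chars.join [' '] (q :: rest'), by simp⟩
        · exact ((ih).mpr ⟨r, hr', hlr⟩).trans ⟨p ++ [' '], [], by simp⟩

-- Membership after the inner keyword loop.
theorem mem_innerFold (ks : List String) (pl : String) (f : PySem.Set String) (x : String) :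
    x ∈ ks.foldl
      (fun f kw => if PySem.Str.isIn (PySem.Str.lower kw) pl then PySem.Set.add f kw else f) f
    ↔ x ∈ f ∨ (x ∈ ks ∧ PySem.Str.isIn (PySem.Str.lower x) pl = true) := by
  induction ks generalizing f with
  | nil => simp
  | cons k ks ih =>
    simp only [List.foldl_cons]
    by_cases hk : PySem.Str.isIn (PySem.Str.lower k) pl = true
    · rw [if_pos hk, ih]
      constructor
      · rintro (hf | ⟨hks, hc⟩)
        · rcases (PySem.Set.mem_add f k x).mp hf with hf' | rfl
          · exact Or.inl hf'
          · exact Or.inr ⟨by simp, hk⟩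
        · exact Or.inr ⟨by simp [hks], hc⟩
      · rintro (hf | ⟨hks, hc⟩)
        · exact Or.inl ((PySem.Set.mem_add f k x).mpr (Or.inl hf))
        · rcases List.mem_cons.mp hks with rfl | hks'
          · exact Or.inl ((PySem.Set.mem_add f x x).mpr (Or.inr rfl))
          · exact Or.inr ⟨hks', hc⟩
    · rw [if_neg hk, ih]
      constructor
      · rintro (hf | ⟨hks, hc⟩)
        · exact Or.inl hf
        · exact Or.inr ⟨by simp [hks], hc⟩
      · rintro (hf | ⟨hks, hc⟩)
        · exact Or.inl hf
        · rcases List.mem_cons.mp hks with rfl | hks'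
          · exact absurd hc hk
          · exact Or.inr ⟨hks', hc⟩

theorem nodup_innerFold (ks : List String) (pl : String) (f : PySem.Set String)
    (hf : f.Nodup) :
    (ks.foldl
      (fun f kw => if PySem.Str.isIn (PySem.Str.lower kw) pl then PySem.Set.add f kw else f)
      f).Nodup := by
  induction ks generalizing f with
  | nil => exact hf
  | cons k ks ih =>
    simp only [List.foldl_cons]
    split
    · exact ih _ (PySem.Set.nodup_add f k hf)
    · exact ih _ hf

-- Membership after the outer pattern loop.
theorem mem_outerFold (ps : List String) (f : PySem.Set String) (x : String) :
    x ∈ ps.foldl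
      (fun found pat =>
        KEYWORDS.foldl
          (fun found kw =>
            if PySem.Str.isIn (PySem.Str.lower kw) (PySem.Str.lower pat) then
              PySem.Set.add found kw
            else found)
          found) f
    ↔ x ∈ f ∨ ∃ p ∈ ps, x ∈ (KEYWORDS : List String) ∧
        PySem.Str.isIn (PySem.Str.lower x) (PySem.Str.lower p) = true := by
  induction ps generalizing f with
  | nil => simp
  | cons p ps ih =>
    simp only [List.foldl_cons]
    rw [ih, mem_innerFold]
    constructor
    · rintro ((hf | ⟨hk, hc⟩) | ⟨q, hq, hk, hc⟩)
      · exact Or.inl hf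
      · exact Or.inr ⟨p, by simp, hk, hc⟩
      · exact Or.inr ⟨q, by simp [hq], hk, hc⟩
    · rintro (hf | ⟨q, hq, hk, hc⟩)
      · exact Or.inl (Or.inl hf)
      · rcases List.mem_cons.mp hq with rfl | hq'
        · exact Or.inl (Or.inr ⟨hk, hc⟩)
        · exact Or.inr ⟨q, hq', hk, hc⟩

theorem nodup_outerFold (ps : List String) (f : PySem.Set String) (hf : f.Nodup) :
    (ps.foldl
      (fun found pat =>
        KEYWORDS.foldl
          (fun found kw =>
            if PySem.Str.isIn (PySem.Str.lower kw) (PySem.Str.lower pat) then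
              PySem.Set.add found kw
            else found)
          found) f).Nodup := by
  induction ps generalizing f with
  | nil => exact hf
  | cons p ps ih => exact ih _ (nodup_innerFold _ _ _ hf)

-- The two ports agree on every input.
theorem main_eq (ps : List String) :
    find_keywords_in_patterns ps = find_keywords_in_patterns_alt ps := by
  unfold find_keywords_in_patterns find_keywords_in_patterns_alt
  simp only []
  apply PySem.List.sorted_eq_of_perm_of_pairwise_lt
  · refine (List.perm_ext_iff_of_nodup
      ((PySem.List.sorted_ofList_pairwise_lt _).imp ne_of_lt |> List.Pairwise.filter _)
      (nodup_outerFold ps PySem.Set.empty List.nodup_nil)).mpr ?_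
    intro x
    rw [List.mem_filter, PySem.List.mem_sorted, mem_outerFold]
    constructor
    · rintro ⟨hk, hblob⟩
      refine Or.inr ?_
      obtain ⟨hne, hsp, hlow⟩ := kw_facts x hk
      rw [PySem.Str.isIn_iff_infix, PySem.Str.toList_join,
        show (" " : String).toList = [' '] from by decide,
        join_infix x.toList hne hsp] at hblob
      obtain ⟨cl, hcl, hinf⟩ := hblob
      rw [List.map_map] at hcl
      obtain ⟨p, hp, rfl⟩ := List.mem_map.mp hcl
      refine ⟨p, hp, hk, ?_⟩
      rw [PySem.Str.isIn_iff_infix, PySem.Str.toList_lower, PySem.Str.toList_lower, hlow]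
      simpa [PySem.Str.toList_lower] using hinf
    · rintro (hf | ⟨p, hp, hk, hc⟩)
      · exact absurd hf (List.not_mem_nil)
      · obtain ⟨hne, hsp, hlow⟩ := kw_facts x hk
        refine ⟨hk, ?_⟩
        rw [PySem.Str.isIn_iff_infix, PySem.Str.toList_join,
          show (" " : String).toList = [' '] from by decide,
          join_infix x.toList hne hsp]
        rw [PySem.Str.isIn_iff_infix, PySem.Str.toList_lower, PySem.Str.toList_lower, hlow] at hc
        refine ⟨PySem.Chars.lower p.toList, ?_, hc⟩
        rw [List.map_map]
        exact List.mem_map.mpr ⟨p, hp, by simp [PySem.Str.toList_lower]⟩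
  · exact (PySem.List.sorted_ofList_pairwise_lt _).filter _

-- ===== VERDICT (by name: the statement is the Claim_ definition above) =====
theorem find_keywords_in_patterns_spec : Claim_equal_find_keywords_in_patterns := by
  intro ps _
  unfold Spec_find_keywords_in_patterns
  exact main_eq ps
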